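-- pv_equiv track=rewrite | github.com/hogilkim/leetcode | 2268. Minimum Number of Keypresses.py | minimumKeypresses
-- ===== SOURCE A (Python) =====
-- from collections import Counter
--
-- def minimumKeypresses(s: str) -> int:
--     counter = Counter(s)
--
--     chars = sorted([(char, counter[char]) for char in counter.keys()], key = lambda x:-x[1])
--
--     res = 0
--     savedchars = 0
--
--     for char, freq in chars:
--         res += (divmod(savedchars,9)[0]+1)*freq
--         savedchars+= 1
--
--     return res
-- ===== SOURCE B (Python) =====
-- from collections import Counter
--
-- def minimumKeypresses(s: str) -> int:
--     # group the descending-sorted frequencies into chunks of 9; the g-th chunk costs g presses each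
--     freqs = sorted(Counter(s).values(), reverse=True)
--     total = 0
--     group = 1
--     while freqs:
--         total += group * sum(freqs[:9])
--         freqs = freqs[9:]
--         group += 1
--     return total
-- ===== Notes on version B (the rewrite author's own statement) =====
-- stated objective: alternative
-- what changed: B sorts the Counter's frequency values descending and consumes them in chunks of 9, adding group*sum(chunk) per chunk, instead of A's per-character loop over sorted (char,freq) pairs that re-derives each key's weight from a running divmod(savedchars,9) counter; same cost, different decomposition.
import Mathlib
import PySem

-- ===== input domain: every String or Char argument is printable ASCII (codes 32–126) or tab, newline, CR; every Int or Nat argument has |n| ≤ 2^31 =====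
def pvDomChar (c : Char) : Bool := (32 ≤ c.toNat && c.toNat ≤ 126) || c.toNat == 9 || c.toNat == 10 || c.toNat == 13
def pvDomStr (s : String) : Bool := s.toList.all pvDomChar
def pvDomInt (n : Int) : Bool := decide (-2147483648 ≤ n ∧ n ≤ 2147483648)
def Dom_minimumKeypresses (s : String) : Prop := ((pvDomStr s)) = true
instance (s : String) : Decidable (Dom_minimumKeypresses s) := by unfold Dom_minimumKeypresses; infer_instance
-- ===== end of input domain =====

-- B replaces A's per-character loop with a running divmod weight by a chunks-of-9 walk over
-- the descending frequency values; same cost, different decomposition.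

-- ===== PORT A =====
-- for char, freq in chars: res += (divmod(savedchars,9)[0]+1)*freq; savedchars += 1
-- (divmod(x,9)[0] is floordiv x 9 — the divisor is the nonzero literal 9)
def minimumKeypresses (s : String) : Int :=
  let counter := PySem.Dict.counter s.toList
  let chars := PySem.List.sorted
      ((PySem.Dict.keys counter).map (fun ch => (ch, counter.getD ch 0)))
      (fun x => -x.2)
  (chars.foldl
      (fun (st : Int × Int) p => (st.1 + (PySem.Int.floordiv st.2 9 + 1) * p.2, st.2 + 1))
      (0, 0)).1

-- ===== PORT B =====
-- while freqs: total += group * sum(freqs[:9]); freqs = freqs[9:]; group += 1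
-- (slices with literal nonnegative bounds: freqs[:9] = take 9, freqs[9:] = drop 9)
def altChunks : List Int → Int → Int → Int
  | [], _, total => total
  | x :: t, group, total =>
      altChunks ((x :: t).drop 9) (group + 1) (total + group * ((x :: t).take 9).sum)
termination_by l => l.length
decreasing_by simp [List.length_drop]

def minimumKeypresses_alt (s : String) : Int :=
  altChunks (PySem.List.sorted (PySem.Dict.counter s.toList).values (fun v => v) true) 1 0

-- ===== PRECONDITION & SPEC =====
def Spec_minimumKeypresses (s : String) (out : Int) : Prop := out = minimumKeypresses_alt s
instance (s : String) (out : Int) : Decidable (Spec_minimumKeypresses s out) := by unfold Spec_minimumKeypresses; infer_instance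

-- ===== CLAIM (what is proved, stated in full; the proofs are below) =====
def Claim_equal_minimumKeypresses : Prop := ∀ (s : String), Dom_minimumKeypresses s → Spec_minimumKeypresses s (minimumKeypresses s)

-- ===== LEMMAS AND PROOFS =====

-- common spec: element at index k (0-based over the whole list) costs (k/9+1)
def wsum : List Int → Nat → Int
  | [], _ => 0
  | f :: r, k => (((k / 9 : Nat) : Int) + 1) * f + wsum r (k + 1)

-- A's loop computes wsum
theorem foldl_eq_wsum (l : List Int) (k : Nat) (t : Int) :
    (l.foldl (fun (st : Int × Int) f => (st.1 + (PySem.Int.floordiv st.2 9 + 1) * f, st.2 + 1))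
      (t, (k : Int))).1 = t + wsum l k := by
  induction l generalizing k t with
  | nil => simp [wsum]
  | cons f r ih =>
      have h9 : PySem.Int.floordiv (k : Int) 9 = ((k / 9 : Nat) : Int) := by
        rw [PySem.Int.floordiv_eq_ediv_of_pos (by norm_num)]
        push_cast
        rfl
      simp only [List.foldl_cons, wsum]
      have hrec := ih (k + 1) (t + (PySem.Int.floordiv (k : Int) 9 + 1) * f)
      push_cast at hrec
      rw [hrec, h9]
      ring

-- one chunk of wsum
theorem wsum_chunk_aux (j : Nat) (hj : j ≤ 9) :
    ∀ (l : List Int) (q : Nat),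
      wsum l (9 * q + (9 - j)) = ((q : Int) + 1) * (l.take j).sum + wsum (l.drop j) (9 * (q + 1)) := by
  induction j with
  | zero =>
      intro l q
      rw [show 9 * q + (9 - 0) = 9 * (q + 1) from by omega]
      simp
  | succ j ih =>
      intro l q
      cases l with
      | nil => simp [wsum]
      | cons f r =>
          have hq : (9 * q + (9 - (j + 1))) / 9 = q := by omega
          have hs : 9 * q + (9 - (j + 1)) + 1 = 9 * q + (9 - j) := by omega
          simp only [wsum, hq, hs, List.take_succ_cons, List.drop_succ_cons, List.sum_cons]
          rw [ih (by omega) r q]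
          ring

theorem wsum_chunk (l : List Int) (q : Nat) :
    wsum l (9 * q) = ((q : Int) + 1) * (l.take 9).sum + wsum (l.drop 9) (9 * (q + 1)) := by
  have := wsum_chunk_aux 9 (by omega) l q
  simpa using this

-- B's chunk loop computes wsum
theorem altChunks_eq_wsum (n : Nat) :
    ∀ (l : List Int), l.length ≤ n → ∀ (q : Nat) (t : Int),
      altChunks l ((q : Int) + 1) t = t + wsum l (9 * q) := by
  induction n with
  | zero =>
      intro l hl q t
      rw [List.length_eq_zero_iff.mp (Nat.le_zero.mp hl), altChunks, wsum]
      ring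
  | succ n ih =>
      intro l hl q t
      cases l with
      | nil => rw [altChunks, wsum]; ring
      | cons f r =>
          rw [altChunks]
          have hlen : ((f :: r).drop 9).length ≤ n := by
            simp [List.length_drop] at *
            omega
          have := ih ((f :: r).drop 9) hlen (q + 1) (t + ((q : Int) + 1) * (((f :: r).take 9).sum))
          rw [show ((q + 1 : Nat) : Int) + 1 = (q : Int) + 1 + 1 by push_cast; ring] at this
          rw [this, wsum_chunk (f :: r) q]
          ring

-- map snd commutes with insertBy when the order only reads snd (A's key -x.2 vs descending values)
theorem map_snd_insertBy (x : Char × Int) (ys : List (Char × Int)) :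
    (PySem.List.insertBy (fun a b : Char × Int => decide (b.2 < a.2)) x ys).map (·.2)
      = PySem.List.insertBy (fun a b : Int => decide (b < a)) x.2 (ys.map (·.2)) := by
  induction ys with
  | nil => simp [PySem.List.insertBy]
  | cons y ys ih =>
      by_cases h : y.2 < x.2 <;> simp [PySem.List.insertBy, h, ih]

theorem map_snd_sorted (ps : List (Char × Int)) :
    (PySem.List.sorted ps (fun x => -x.2) false).map (·.2)
      = PySem.List.sorted (ps.map (·.2)) (fun v => v) true := by
  rw [PySem.List.sorted_eq_foldl_insertBy, PySem.List.sorted_rev_eq_foldl_insertBy]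
  have hp : (fun a b : Char × Int => decide (-a.2 < -b.2)) = (fun a b : Char × Int => decide (b.2 < a.2)) := by
    funext a b; simp
  rw [hp]
  suffices h : ∀ (acc : List (Char × Int)),
      (ps.foldl (fun acc x => PySem.List.insertBy (fun a b => decide (b.2 < a.2)) x acc) acc).map (·.2)
        = (ps.map (·.2)).foldl (fun acc v => PySem.List.insertBy (fun a b : Int => decide (b < a)) v acc) (acc.map (·.2)) by
    simpa using h []
  induction ps with
  | nil => intro acc; simp
  | cons p ps ih =>
      intro acc
      simp only [List.foldl_cons, List.map_cons]
      rw [ih, map_snd_insertBy]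

theorem counter_keys_nodup (xs : List Char) : (PySem.Dict.counter xs).keys.Nodup := by
  rw [PySem.Dict.counter_eq_foldl]
  exact PySem.Dict.nodup_keys_foldl_modify_key xs (fun x => x) 0 (fun _ _ v => v + 1)
    PySem.Dict.empty (by simp)

-- ===== VERDICT (by name: the statement is the Claim_ definition above) =====
theorem minimumKeypresses_spec : Claim_equal_minimumKeypresses := by
  intro s _
  unfold Spec_minimumKeypresses
  simp only [minimumKeypresses, minimumKeypresses_alt]
  have hpairs : List.map (fun ch => (ch, (PySem.Dict.counter s.toList).getD ch 0))
        (PySem.Dict.counter s.toList).keys = (PySem.Dict.counter s.toList).items :=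
    (PySem.Dict.items_eq_map_keys _ (counter_keys_nodup s.toList) 0).symm
  rw [hpairs]
  -- reduce A's fold over pairs to a fold over the snd components
  rw [show (0, 0) = ((0 : Int), ((0 : Nat) : Int)) by norm_num]
  rw [← List.foldl_map (f := fun p : Char × Int => p.2)
        (g := fun (st : Int × Int) f => (st.1 + (PySem.Int.floordiv st.2 9 + 1) * f, st.2 + 1))]
  rw [map_snd_sorted, foldl_eq_wsum]
  have hvals : ((PySem.Dict.counter s.toList).items).map (·.2) = (PySem.Dict.counter s.toList).values := rfl
  rw [hvals]
  have := altChunks_eq_wsum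
      (PySem.List.sorted (PySem.Dict.counter s.toList).values (fun v => v) true).length
      (PySem.List.sorted (PySem.Dict.counter s.toList).values (fun v => v) true) (le_refl _) 0 0
  simp only [Nat.cast_zero, zero_add, mul_zero] at this ⊢
  rw [this]
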